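-- pv_equiv track=rewrite | github.com/rooigety/triads | src/triads/apps/Chord_Finder.py | find_open_chord
-- ===== SOURCE A (Python) =====
-- from typing import List, Tuple
--
-- CHORDS = ["C", "C#", "D", "D#", "E", "F", "F#", "G", "G#", "A", "A#", "B"]
--
-- STRINGS = ["E", "A", "D", "G", "B", "E"]
--
-- def make_tones(chord: str) -> list:
--     """Make tones from the selected chord."""
--     index = CHORDS.index(chord)
--     return CHORDS[index:] + CHORDS[:index]
--
-- def find_open_chord(triads: List[str]) -> Tuple[List[str]]:
--     """Find open chord from the selected triads."""
--     chord = []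
--     places = []
--     for string in STRINGS:
--         tones = make_tones(string)
--         for note in tones:
--             if note in triads:
--                 chord.append(note)
--                 places.append(tones.index(note))
--                 break
--
--     # # Makes sure fingering is okay.
--     # chord.reverse()
--     # places.reverse()
--     # _strings = STRINGS.copy()
--     # _strings.reverse()
--
--     # anchor = places[0]
--     # for i in range(1, len(places)):
--     #     tones = make_tones(_strings[i])
--
--     #     # Find the next note from the triad in this string.
--     #     for fret in range(places[i] + 1, 12):
--     #         if tones[fret] in triads:
--     #             if abs(fret - anchor) < abs(places[i] - anchor):
--     #                 chord[i] = tones[fret]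
--     #                 places[i] = fret
--     #             else:
--     #                 fret = places[i]
--
--     #             anchor = fret
--     #             break
--
--     # places.reverse()
--     # chord.reverse()
--
--     if places[0] == 0 and chord[0] != triads[0]:
--         chord[0] = "x"
--         places[0] = -1
--
--     return chord, places
-- ===== SOURCE B (Python) =====
-- from typing import List, Tuple
--
-- CHORDS = ["C", "C#", "D", "D#", "E", "F", "F#", "G", "G#", "A", "A#", "B"]
--
-- STRINGS = ["E", "A", "D", "G", "B", "E"]
--
-- def find_open_chord(triads):
--     """Find open chord from the selected triads (min-fret via modular arithmetic)."""
--     chord = []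
--     places = []
--     for string in STRINGS:
--         base = CHORDS.index(string)
--         best = None
--         for t in triads:
--             if t in CHORDS:
--                 f = (CHORDS.index(t) - base) % 12
--                 if best is None or f < best:
--                     best = f
--         if best is not None:
--             chord.append(CHORDS[(base + best) % 12])
--             places.append(best)
--
--     if places[0] == 0 and chord[0] != triads[0]:
--         chord[0] = "x"
--         places[0] = -1
--
--     return chord, places
-- ===== Notes on version B (the rewrite author's own statement) =====
-- stated objective: simpler
-- what changed: Drops make_tones and the rotated-list scan-with-break: for each string B computes each valid triad note's fret directly as (CHORDS.index(note) - CHORDS.index(string)) % 12 and keeps the minimum fret, which equals the first match of A's ordered scan.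
import Mathlib
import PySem

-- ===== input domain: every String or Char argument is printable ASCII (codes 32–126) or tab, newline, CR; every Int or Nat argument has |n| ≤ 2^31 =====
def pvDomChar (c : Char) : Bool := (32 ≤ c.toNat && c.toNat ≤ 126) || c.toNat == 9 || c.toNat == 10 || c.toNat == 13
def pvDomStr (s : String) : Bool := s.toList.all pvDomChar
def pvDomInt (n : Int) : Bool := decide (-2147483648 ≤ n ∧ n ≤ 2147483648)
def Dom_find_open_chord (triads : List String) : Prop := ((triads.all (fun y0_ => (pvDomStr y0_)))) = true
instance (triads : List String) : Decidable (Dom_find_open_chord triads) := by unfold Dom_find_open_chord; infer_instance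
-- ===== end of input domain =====

-- B replaces A's rotated-list scan-with-break by a direct minimum-fret computation via modular
-- arithmetic over the triad notes (objective: simpler — no make_tones, no rotation).

-- ===== PORT A =====
def pvCHORDS : List String := ["C", "C#", "D", "D#", "E", "F", "F#", "G", "G#", "A", "A#", "B"]

def pvSTRINGS : List String := ["E", "A", "D", "G", "B", "E"]

-- CHORDS.index(chord) raises ValueError when absent; A only calls it on STRINGS elements,
-- which are all in CHORDS, so the `.getD 0` default is never used.
def make_tones (chord : String) : List String :=
  let index : Nat := (PySem.List.index? pvCHORDS chord).getD 0
  PySem.List.slice pvCHORDS (some (index : Int)) none ++ PySem.List.slice pvCHORDS none (some (index : Int))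

-- the inner `for note in tones: if note in triads: …; break` loop; `full` is the whole tones list
-- (needed for `tones.index(note)`)
def pvScanA (triads full : List String) : List String → Option (String × Int)
  | [] => none
  | note :: rest =>
      if note ∈ triads then some (note, (((PySem.List.index? full note).getD 0 : Nat) : Int))
      else pvScanA triads full rest

def find_open_chord (triads : List String) : List String × List Int :=
  let cp := pvSTRINGS.foldl (fun (st : List String × List Int) string =>
      let tones := make_tones string
      match pvScanA triads tones tones with
      | some (note, idx) => (st.1 ++ [note], st.2 ++ [idx])
      | none => st) ([], [])
  -- `if places[0] == 0 and chord[0] != triads[0]` — the fall-through arm is where Python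
  -- raises IndexError (places empty); those inputs are excluded by Pre_find_open_chord.
  match PySem.List.pyGet? cp.2 0, PySem.List.pyGet? cp.1 0, PySem.List.pyGet? triads 0 with
  | some p0, some c0, some t0 =>
      if p0 = 0 ∧ c0 ≠ t0 then ("x" :: cp.1.tail, (-1 : Int) :: cp.2.tail) else cp
  | _, _, _ => cp

-- ===== PORT B =====
def pvBestStep (base : Int) (best : Option Int) (t : String) : Option Int :=
  if t ∈ pvCHORDS then
    let f := PySem.Int.mod ((((PySem.List.index? pvCHORDS t).getD 0 : Nat) : Int) - base) 12
    match best with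
    | none => some f
    | some b => if f < b then some f else some b
  else best

def pvBest (base : Int) (triads : List String) : Option Int :=
  triads.foldl (pvBestStep base) none

def find_open_chord_alt (triads : List String) : List String × List Int :=
  let cp := pvSTRINGS.foldl (fun (st : List String × List Int) string =>
      let base : Int := ((PySem.List.index? pvCHORDS string).getD 0 : Nat)
      match pvBest base triads with
      | some f => (st.1 ++ [PySem.List.pyGetD pvCHORDS (PySem.Int.mod (base + f) 12) ""], st.2 ++ [f])
      | none => st) ([], [])
  match PySem.List.pyGet? cp.2 0 with
  | none => cp
  | some p0 =>
    match PySem.List.pyGet? cp.1 0 with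
    | none => cp
    | some c0 =>
      match PySem.List.pyGet? triads 0 with
      | none => cp
      | some t0 =>
        if p0 = 0 ∧ c0 ≠ t0 then ("x" :: cp.1.tail, (-1 : Int) :: cp.2.tail) else cp

-- ===== PRECONDITION & SPEC =====
-- Pre_ excludes exactly the inputs on which A raises IndexError at `places[0]`:
-- triads containing no chord name leave `places` empty (this includes the empty list).
def Pre_find_open_chord (triads : List String) : Prop :=
  ∃ t ∈ triads, t ∈ (["C", "C#", "D", "D#", "E", "F", "F#", "G", "G#", "A", "A#", "B"] : List String)
instance (triads : List String) : Decidable (Pre_find_open_chord triads) := by unfold Pre_find_open_chord; infer_instance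

def pvWitness_find_open_chord : List String := ["C", "E", "G"]

def Spec_find_open_chord (triads : List String) (out : List String × List Int) : Prop := out = find_open_chord_alt triads
instance (triads : List String) (out : List String × List Int) : Decidable (Spec_find_open_chord triads out) := by unfold Spec_find_open_chord; infer_instance

-- ===== CLAIM (what is proved, stated in full; the proofs are below) =====
def Claim_equal_find_open_chord : Prop := ∀ (triads : List String), Dom_find_open_chord triads → Pre_find_open_chord triads → Spec_find_open_chord triads (find_open_chord triads)

-- ===== LEMMAS AND PROOFS =====

-- minimum of two optional frets (first argument wins ties)
def pvMerge : Option Int → Option Int → Option Int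
  | none, m => m
  | some a, none => some a
  | some a, some b => some (min a b)

def pvMergeN : Option Nat → Option Nat → Option Nat
  | none, m => m
  | some a, none => some a
  | some a, some b => some (min a b)

theorem pvMerge_none_right (a : Option Int) : pvMerge a none = a := by cases a <;> rfl

theorem pvMerge_assoc (a b c : Option Int) : pvMerge (pvMerge a b) c = pvMerge a (pvMerge b c) := by
  cases a <;> cases b <;> cases c <;> simp [pvMerge, min_assoc]

theorem pvMergeN_map_cast (a b : Option Nat) :
    Option.map (fun k : Nat => (k : Int)) (pvMergeN a b) =
      pvMerge (Option.map (fun k : Nat => (k : Int)) a) (Option.map (fun k : Nat => (k : Int)) b) := by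
  cases a <;> cases b <;> simp [pvMergeN, pvMerge, Nat.cast_min]

-- first index satisfying p-or-q is the min of the two first indices
theorem findIdx?_or (p q : String → Bool) (l : List String) :
    l.findIdx? (fun x => p x || q x) = pvMergeN (l.findIdx? p) (l.findIdx? q) := by
  induction l with
  | nil => rfl
  | cons x l ih =>
      by_cases hp : p x = true
      · by_cases hq : q x = true
        · simp [List.findIdx?_cons, hp, hq, pvMergeN]
        · simp [List.findIdx?_cons, hp, hq]
          cases l.findIdx? q <;> simp [pvMergeN]
      · by_cases hq : q x = true
        · simp [List.findIdx?_cons, hp, hq]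
          cases l.findIdx? p <;> simp [pvMergeN]
        · simp [List.findIdx?_cons, hp, hq, ih]
          cases l.findIdx? p <;> cases l.findIdx? q <;> simp [pvMergeN]

-- pvBestStep folds to a pvMerge with the first matching position in the rotated list `tones`
-- (H1 links modular arithmetic on pvCHORDS indices with positions in `tones`)
theorem pvBest_eq_first (b : Int) (tones : List String)
    (H1 : ∀ t ∈ pvCHORDS, Option.map (fun k : Nat => (k : Int)) (tones.findIdx? (fun n => n == t)) =
        some (PySem.Int.mod ((((PySem.List.index? pvCHORDS t).getD 0 : Nat) : Int) - b) 12))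
    (H2 : ∀ t : String, t ∉ pvCHORDS → tones.findIdx? (fun n => n == t) = none) :
    ∀ (triads : List String) (acc : Option Int),
      triads.foldl (pvBestStep b) acc =
        pvMerge acc (Option.map (fun k : Nat => (k : Int))
          (tones.findIdx? (fun n => decide (n ∈ triads)))) := by
  intro triads
  induction triads with
  | nil =>
      intro acc
      have h0 : tones.findIdx? (fun n : String => decide (n ∈ ([] : List String))) = none := by
        rw [List.findIdx?_eq_none_iff]; intro x _; simp
      simp only [List.foldl_nil, h0, Option.map_none, pvMerge_none_right]
  | cons t rest ih =>
      intro acc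
      have hfun : (fun n : String => decide (n ∈ t :: rest)) =
          (fun n : String => (n == t) || decide (n ∈ rest)) := by
        funext n; by_cases h : n = t <;> simp [h]
      have hsplit : tones.findIdx? (fun n => decide (n ∈ t :: rest)) =
          pvMergeN (tones.findIdx? (fun n => n == t)) (tones.findIdx? (fun n => decide (n ∈ rest))) := by
        rw [hfun, findIdx?_or]
      rw [List.foldl_cons, ih (pvBestStep b acc t), hsplit, pvMergeN_map_cast, ← pvMerge_assoc]
      congr 1
      by_cases ht : t ∈ pvCHORDS
      · rw [H1 t ht]
        unfold pvBestStep
        rw [if_pos ht]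
        cases acc with
        | none => rfl
        | some a =>
            simp only [pvMerge]
            split_ifs with h
            · rw [min_eq_right (le_of_lt h)]
            · rw [min_eq_left (le_of_not_gt h)]
      · rw [H2 t ht]
        simp [pvBestStep, ht, pvMerge_none_right]

theorem index?_append_cons (c : String) :
    ∀ (pre rest : List String), c ∉ pre →
      PySem.List.index? (pre ++ c :: rest) c = some pre.length := by
  intro pre
  induction pre with
  | nil => intro rest _; simpa using PySem.List.index?_cons_self c rest
  | cons x pre ih =>
      intro rest h
      have hx : x ≠ c := by
        intro hxc; exact h (by simp [hxc])
      have hc : c ∉ pre := fun hc => h (List.mem_cons_of_mem _ hc)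
      rw [List.cons_append, PySem.List.index?_cons_of_ne _ hx, ih rest hc]
      simp

-- A's break-scan returns the first matching note together with its index in the full tones list
theorem scanA_eq (triads : List String) :
    ∀ (suf pre : List String), (pre ++ suf).Nodup →
      pvScanA triads (pre ++ suf) suf =
        Option.map (fun k : Nat => (suf.getD k "", ((pre.length + k : Nat) : Int)))
          (suf.findIdx? (fun n => decide (n ∈ triads))) := by
  intro suf
  induction suf with
  | nil => intro pre _; rfl
  | cons note rest ih =>
      intro pre hnd
      by_cases h : note ∈ triads
      · have hnp : note ∉ pre := by
          rcases List.nodup_append.mp hnd with ⟨-, -, hdisj⟩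
          intro hin; exact hdisj note hin note (List.mem_cons_self ..) rfl
        simp only [pvScanA, if_pos h, List.findIdx?_cons, decide_eq_true h]
        rw [index?_append_cons note pre rest hnp]
        simp
      · have heq : pre ++ note :: rest = (pre ++ [note]) ++ rest := by simp
        have hnd' : ((pre ++ [note]) ++ rest).Nodup := by rw [← heq]; exact hnd
        simp only [pvScanA, if_neg h]
        rw [heq, ih (pre ++ [note]) hnd']
        have hfc : (note :: rest).findIdx? (fun n => decide (n ∈ triads)) =
            (rest.findIdx? (fun n => decide (n ∈ triads))).map (· + 1) := by
          simp [List.findIdx?_cons, h]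
        rw [hfc]
        cases rest.findIdx? (fun n => decide (n ∈ triads)) with
        | none => rfl
        | some k =>
            simp only [Option.map_some, List.getD_cons_succ, List.length_append,
              List.length_cons, List.length_nil]
            congr 2
            omega

theorem findIdx?_beq_none (tones : List String) (t : String)
    (hsub : ∀ x ∈ tones, x ∈ pvCHORDS) (ht : t ∉ pvCHORDS) :
    tones.findIdx? (fun n => n == t) = none := by
  rw [List.findIdx?_eq_none_iff]
  intro x hx
  simp only [beq_eq_false_iff_ne, ne_eq]
  intro hxt
  exact ht (hxt ▸ hsub x hx)

-- the per-string step of A's fold equals the per-string step of B's fold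
theorem step_generic (b : Nat) (tones : List String)
    (Hnd : tones.Nodup) (Hsub : ∀ x ∈ tones, x ∈ pvCHORDS) (Hlen : tones.length = 12)
    (H1 : ∀ t ∈ pvCHORDS, Option.map (fun k : Nat => (k : Int)) (tones.findIdx? (fun n => n == t)) =
        some (PySem.Int.mod ((((PySem.List.index? pvCHORDS t).getD 0 : Nat) : Int) - (b : Int)) 12))
    (Hnote : ∀ k : Nat, k < 12 → tones.getD k "" =
        PySem.List.pyGetD pvCHORDS (PySem.Int.mod ((b : Int) + (k : Int)) 12) "")
    (triads : List String) (st : List String × List Int) :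
    (match pvScanA triads tones tones with
     | some (note, idx) => (st.1 ++ [note], st.2 ++ [idx])
     | none => st)
    = (match pvBest (b : Int) triads with
       | some f => (st.1 ++ [PySem.List.pyGetD pvCHORDS (PySem.Int.mod ((b : Int) + f) 12) ""],
                    st.2 ++ [f])
       | none => st) := by
  have hA : pvScanA triads tones tones =
      Option.map (fun k : Nat => (tones.getD k "", ((0 + k : Nat) : Int)))
        (tones.findIdx? (fun n => decide (n ∈ triads))) :=
    scanA_eq triads tones [] (by simpa using Hnd)
  have hB : pvBest (b : Int) triads =
      Option.map (fun k : Nat => (k : Int)) (tones.findIdx? (fun n => decide (n ∈ triads))) := by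
    have := pvBest_eq_first (b : Int) tones H1
      (fun t ht => findIdx?_beq_none tones t Hsub ht) triads none
    simpa [pvBest, pvMerge] using this
  rw [hA, hB]
  cases hF : tones.findIdx? (fun n => decide (n ∈ triads)) with
  | none => rfl
  | some k =>
      have hk : k < 12 := by
        have := List.findIdx?_eq_some_iff_findIdx_eq.mp hF
        omega
      simp only [Option.map_some, Nat.zero_add]
      rw [Hnote k hk]

-- the two folds over the six strings produce the same (chord, places) pair
theorem cp_eq (triads : List String) :
    pvSTRINGS.foldl (fun (st : List String × List Int) string =>
        let tones := make_tones string
        match pvScanA triads tones tones with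
        | some (note, idx) => (st.1 ++ [note], st.2 ++ [idx])
        | none => st) ([], [])
    = pvSTRINGS.foldl (fun (st : List String × List Int) string =>
        let base : Int := ((PySem.List.index? pvCHORDS string).getD 0 : Nat)
        match pvBest base triads with
        | some f => (st.1 ++ [PySem.List.pyGetD pvCHORDS (PySem.Int.mod (base + f) 12) ""],
                     st.2 ++ [f])
        | none => st) ([], []) := by
  apply PySem.List.foldl_congr_mem
  intro st x hx
  have hx' : x = "E" ∨ x = "A" ∨ x = "D" ∨ x = "G" ∨ x = "B" := by
    simp [pvSTRINGS] at hx; tauto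
  rcases hx' with rfl | rfl | rfl | rfl | rfl <;>
    exact step_generic _ (make_tones _) (by decide) (by decide) (by decide) (by decide)
      (by decide) triads st

-- the (identical) trailing adjustment, written in A's match shape and in B's tuple-match shape
theorem adjust_eq (cp : List String × List Int) (triads : List String) :
    (match PySem.List.pyGet? cp.2 0, PySem.List.pyGet? cp.1 0, PySem.List.pyGet? triads 0 with
     | some p0, some c0, some t0 =>
         if p0 = 0 ∧ c0 ≠ t0 then ("x" :: cp.1.tail, (-1 : Int) :: cp.2.tail) else cp
     | _, _, _ => cp)
    = (match PySem.List.pyGet? cp.2 0 with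
       | none => cp
       | some p0 =>
         match PySem.List.pyGet? cp.1 0 with
         | none => cp
         | some c0 =>
           match PySem.List.pyGet? triads 0 with
           | none => cp
           | some t0 =>
             if p0 = 0 ∧ c0 ≠ t0 then ("x" :: cp.1.tail, (-1 : Int) :: cp.2.tail) else cp) := by
  cases PySem.List.pyGet? cp.2 0 <;> cases PySem.List.pyGet? cp.1 0 <;>
    cases PySem.List.pyGet? triads 0 <;> rfl

-- ===== VERDICT (by name: the statement is the Claim_ definition above) =====
theorem find_open_chord_spec : Claim_equal_find_open_chord := by
  intro triads _ _
  unfold Spec_find_open_chord find_open_chord find_open_chord_alt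
  rw [cp_eq triads, adjust_eq]
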